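-- pv_equiv track=rewrite | github.com/alexandraback/datacollection | solutions_5631989306621952_0/Python/Simonsch/prob2a.py | f
-- ===== SOURCE A (Python) =====
-- def f(line):
--     if len(line) < 2:
--         return line
--     pivot = max(line)
--     results = []
--     for i in range(0, len(line)):
--         if line[i] == pivot:
--             results.append(pivot + f(line[:i]) + line[(i+1):])
--     return max(results)
-- ===== SOURCE B (Python) =====
-- def f(line):
--     s = line
--     picks = []
--     tails = []
--     while len(s) >= 2:
--         p = max(s)
--         j = len(s) - 1 - s[::-1].index(p)
--         picks.append(p)
--         tails.append(s[j+1:])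
--         s = s[:j]
--     return ''.join(picks) + s + ''.join(reversed(tails))
-- ===== Notes on version B (the rewrite author's own statement) =====
-- stated objective: faster
-- what changed: Replaces A's exponential branching recursion (one recursive call per occurrence of the max character, then max over the candidates) by an iterative loop that always moves the rightmost occurrence of the current maximum to the front, which provably yields the same (lexicographically maximal) candidate; O(n^2) instead of exponential.
import Mathlib
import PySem

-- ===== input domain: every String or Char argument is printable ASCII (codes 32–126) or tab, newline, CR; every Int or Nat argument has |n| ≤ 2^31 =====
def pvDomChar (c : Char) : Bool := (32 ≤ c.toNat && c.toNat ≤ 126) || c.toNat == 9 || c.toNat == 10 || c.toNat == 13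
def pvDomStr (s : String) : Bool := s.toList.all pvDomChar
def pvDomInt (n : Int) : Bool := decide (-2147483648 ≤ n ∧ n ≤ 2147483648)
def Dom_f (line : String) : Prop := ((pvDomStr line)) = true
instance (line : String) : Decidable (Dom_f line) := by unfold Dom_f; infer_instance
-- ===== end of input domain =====

-- B replaces A's branching recursion (one recursive call per occurrence of the maximum
-- character, then max over all candidates) by a single loop that always moves the rightmost
-- occurrence of the current maximum to the front (objective: faster; measured by the check).

-- ===== PORT A =====
-- A, transliterated: the string is ported as its char list; max(line) is PySem.List.max?,
-- the for-loop with if/append is a foldl over range(len(line)) (attach carries the index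
-- bound for termination), max(results) is PySem.List.max? again.  The two 'none' branches
-- are Python's max() on an empty sequence: unreachable here, since len(line) >= 2 and
-- results is nonempty (the pivot occurs in line).
def fA (s : List Char) : List Char :=
  if s.length < 2 then s
  else
    match PySem.List.max? s (fun c => c) with
    | none => []
    | some pivot =>
      let results := (List.range s.length).attach.foldl
        (fun acc i =>
          if s[i.1]? == some pivot then
            acc ++ [pivot :: (fA (s.take i.1) ++ s.drop (i.1 + 1))]
          else acc) []
      match PySem.List.max? results (fun r => r) with
      | none => []
      | some r => r
termination_by s.length
decreasing_by
  have := List.mem_range.mp i.2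
  simp [List.length_take]
  omega


def f (line : String) : String := String.ofList (fA line.toList)

-- ===== PORT B =====
-- B, transliterated: the while-loop is the recursion of fBloop over the same state
-- (s, picks, tails); j = len(s)-1-s[::-1].index(max(s)) is the rightmost occurrence of the
-- maximum; the final return is picks + s + reversed(tails) joined.  The two 'none' branches
-- are unreachable (len(s) >= 2 and max(s) is a member of s).
def fBloop (s : List Char) (picks : List Char) (tails : List (List Char)) : List Char :=
  if s.length < 2 then picks ++ s ++ tails.reverse.flatten
  else
    match PySem.List.max? s (fun c => c) with
    | none => []
    | some p =>
      match PySem.List.index? s.reverse p with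
      | none => []
      | some k =>
        let j := s.length - 1 - k
        fBloop (s.take j) (picks ++ [p]) (tails ++ [s.drop (j + 1)])
termination_by s.length
decreasing_by
  simp [List.length_take]
  omega


def f_alt (line : String) : String := String.ofList (fBloop line.toList [] [])

-- ===== PRECONDITION & SPEC =====
def Spec_f (line : String) (out : String) : Prop := out = f_alt line
instance (line : String) (out : String) : Decidable (Spec_f line out) := by unfold Spec_f; infer_instance

-- ===== CLAIM (what is proved, stated in full; the proofs are below) =====
def Claim_equal_f : Prop := ∀ (line : String), Dom_f line → Spec_f line (f line)

-- ===== LEMMAS AND PROOFS =====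

-- the common value of both programs, as a proof-side recursion: move the rightmost
-- occurrence of the maximum to the front, recurse on what was before it, keep the rest.
def maxChar : List Char → Char
  | [] => ' '
  | c :: t => t.foldl max c
def jmaxIdx (s : List Char) : Nat := s.length - 1 - s.reverse.idxOf (maxChar s)
def core (s : List Char) : List Char :=
  if s.length < 2 then s
  else maxChar s :: core (s.take (jmaxIdx s)) ++ s.drop (jmaxIdx s + 1)
termination_by s.length
decreasing_by
  simp only [List.length_take]
  unfold jmaxIdx
  omega
theorem maxChar_mem (s : List Char) (h : s ≠ []) : maxChar s ∈ s := by
  match s with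
  | c :: t => rcases PySem.List.foldl_max_mem t c with h1 | h1 <;> simp [maxChar, h1]
theorem le_maxChar (s : List Char) : ∀ c ∈ s, c ≤ maxChar s := by
  match s with
  | [] => simp
  | c :: t =>
    intro x hx
    rcases List.mem_cons.mp hx with rfl | hx
    · exact (PySem.List.le_foldl_max t x).1
    · exact (PySem.List.le_foldl_max t c).2 x hx
theorem maxChar_eq (s : List Char) (p : Char) (hp : p ∈ s) (hle : ∀ c ∈ s, c ≤ p) :
    maxChar s = p := by
  have h1 : maxChar s ∈ s := maxChar_mem s (by rintro rfl; simp at hp)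
  exact le_antisymm (hle _ h1) (le_maxChar s p hp)
theorem jmax_decomp (u m : List Char) (p : Char)
    (hmax : maxChar (u ++ p :: m) = p) (hpm : p ∉ m) :
    jmaxIdx (u ++ p :: m) = u.length := by
  unfold jmaxIdx
  rw [hmax]
  have h1 : (u ++ p :: m).reverse = m.reverse ++ p :: u.reverse := by simp
  have h2 : p ∉ m.reverse := by simpa using hpm
  rw [h1, List.idxOf_append]
  simp [h2, List.idxOf_cons_self]
theorem core_eq_cons (s : List Char) (h : 2 ≤ s.length) :
    core s = maxChar s :: core (s.take (jmaxIdx s)) ++ s.drop (jmaxIdx s + 1) := by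
  rw [core]
  simp [Nat.not_lt.mpr h]

theorem all_le_decomp {u m : List Char} {p : Char}
    (hu : ∀ c ∈ u, c ≤ p) (hm : ∀ c ∈ m, c ≤ p) : ∀ c ∈ u ++ p :: m, c ≤ p := by
  intro x hx
  rcases List.mem_append.mp hx with h|h
  · exact hu x h
  · rcases List.mem_cons.mp h with rfl|h
    · exact le_refl x
    · exact hm x h

theorem core_decomp (u m : List Char) (p : Char)
    (hu : ∀ c ∈ u, c ≤ p) (hm : ∀ c ∈ m, c ≤ p) (hpm : p ∉ m) :
    core (u ++ p :: m) = p :: core u ++ m := by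
  have hmax : maxChar (u ++ p :: m) = p :=
    maxChar_eq _ p (by simp) (all_le_decomp hu hm)
  by_cases hlen : (u ++ p :: m).length < 2
  · have hu0 : u = [] := by simp at hlen; exact List.eq_nil_of_length_eq_zero (by omega)
    have hm0 : m = [] := by simp at hlen; exact List.eq_nil_of_length_eq_zero (by omega)
    subst hu0; subst hm0
    rw [core, core]
    simp
    rw [core]
    simp
  · rw [core_eq_cons _ (Nat.not_lt.mp hlen), hmax, jmax_decomp u m p hmax hpm]
    have ht : List.take u.length (u ++ p :: m) = u := List.take_left
    have hd : List.drop (u.length + 1) (u ++ p :: m) = m := by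
      have h2 : u ++ p :: m = (u ++ [p]) ++ m := by simp
      have h3 : u.length + 1 = (u ++ [p]).length := by simp
      rw [h2, h3, List.drop_left]
    rw [ht, hd]

theorem core_subset (s : List Char) : ∀ c ∈ core s, c ∈ s := by
  by_cases h : s.length < 2
  · rw [core]; simp [h]
  · rw [core_eq_cons s (Nat.not_lt.mp h)]
    intro c hc
    have hc2 : c = maxChar s ∨ c ∈ core (List.take (jmaxIdx s) s) ∨ c ∈ List.drop (jmaxIdx s + 1) s := by
      simpa using hc
    rcases hc2 with rfl|h1|h1
    · exact maxChar_mem s (by rintro rfl; simp at h)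
    · exact List.mem_of_mem_take (core_subset _ c h1)
    · exact List.mem_of_mem_drop h1
termination_by s.length
decreasing_by
  simp only [List.length_take]
  unfold jmaxIdx
  omega

theorem cons_lt_cons_same (a : Char) {x y : List Char} (h : x < y) : a::x < a::y :=
  List.cons_lt_cons_iff.mpr (Or.inr ⟨rfl, h⟩)

theorem cons_le_cons_same (a : Char) {x y : List Char} (h : x ≤ y) : a::x ≤ a::y := by
  rcases lt_or_eq_of_le h with h|rfl
  · exact le_of_lt (cons_lt_cons_same a h)
  · exact le_refl _

theorem lex_push (p : Char) (x y : List Char) (hx : ∀ c ∈ x, c ≤ p) :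
    x ++ p :: y ≤ p :: (x ++ y) := by
  induction x with
  | nil => simp
  | cons c x' ih =>
    have hc : c ≤ p := hx c (by simp)
    rcases lt_or_eq_of_le hc with h | rfl
    · exact le_of_lt (List.Lex.rel h)
    · exact cons_le_cons_same c (ih (fun d hd => hx d (by simp [hd])))

theorem exists_first_occ (s : List Char) (p : Char) (h : p ∈ s) :
    ∃ u m, s = u ++ p :: m ∧ p ∉ u := by
  obtain ⟨k, hk⟩ := Option.isSome_iff_exists.mp ((PySem.List.index?_isSome_iff s p).mpr h)
  obtain ⟨pre, suf, hs, -, hnp⟩ := (PySem.List.index?_eq_some_iff s p k).mp hk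
  exact ⟨pre, suf, hs, hnp⟩

theorem exists_last_occ (s : List Char) (p : Char) (h : p ∈ s) :
    ∃ u m, s = u ++ p :: m ∧ p ∉ m := by
  obtain ⟨u, m, hs, hnu⟩ := exists_first_occ s.reverse p (by simpa using h)
  refine ⟨m.reverse, u.reverse, ?_, by simpa using hnu⟩
  have := congrArg List.reverse hs
  simpa using this

theorem core_dominate_nopiv (p : Char) (m u r : List Char)
    (hu : ∀ c ∈ u, c ≤ p) (hm : ∀ c ∈ m, c ≤ p) (hpm : p ∉ m) :
    core u ++ (m ++ p :: r) ≤ core (u ++ p :: m) ++ r := by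
  rw [core_decomp u m p hu hm hpm]
  have hx : ∀ c ∈ core u ++ m, c ≤ p := by
    intro c hc
    rcases List.mem_append.mp hc with h|h
    · exact hu c (core_subset u c h)
    · exact hm c h
  have := lex_push p (core u ++ m) r hx
  calc core u ++ (m ++ p :: r) = (core u ++ m) ++ p :: r := by simp
    _ ≤ p :: ((core u ++ m) ++ r) := this
    _ = (p :: core u ++ m) ++ r := by simp

theorem core_dominate (p : Char) (n : Nat) : ∀ (m : List Char), m.count p ≤ n →
    ∀ (u r : List Char), (∀ c ∈ u, c ≤ p) → (∀ c ∈ m, c ≤ p) →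
    core u ++ (m ++ p :: r) ≤ core (u ++ p :: m) ++ r := by
  induction n with
  | zero =>
    intro m hc u r hu hm
    exact core_dominate_nopiv p m u r hu hm (by
      intro h; exact absurd (List.count_pos_iff.mpr h) (by omega))
  | succ n ih =>
    intro m hc u r hu hm
    by_cases hpm : p ∈ m
    · obtain ⟨m1, m2, rfl, hm1⟩ := exists_first_occ m p hpm
      have hm1le : ∀ c ∈ m1, c ≤ p := fun c h => hm c (by simp [h])
      have hm2le : ∀ c ∈ m2, c ≤ p := fun c h => hm c (by simp [h])
      have hcnt : m2.count p ≤ n := by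
        have h0 : m1.count p = 0 := List.count_eq_zero.mpr hm1
        have := hc
        simp [List.count_append, h0] at this ⊢
        omega
      have step1 : core u ++ ((m1 ++ p :: m2) ++ p :: r) ≤ core (u ++ p :: m1) ++ (m2 ++ p :: r) := by
        have := core_dominate_nopiv p m1 u (m2 ++ p :: r) hu hm1le hm1
        calc core u ++ ((m1 ++ p :: m2) ++ p :: r) = core u ++ (m1 ++ p :: (m2 ++ p :: r)) := by simp
          _ ≤ core (u ++ p :: m1) ++ (m2 ++ p :: r) := this
      have hu2 : ∀ c ∈ u ++ p :: m1, c ≤ p := all_le_decomp hu hm1le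
      have step2 : core (u ++ p :: m1) ++ (m2 ++ p :: r) ≤ core ((u ++ p :: m1) ++ p :: m2) ++ r :=
        ih m2 hcnt (u ++ p :: m1) r hu2 hm2le
      have heq : (u ++ p :: m1) ++ p :: m2 = u ++ p :: (m1 ++ p :: m2) := by simp
      rw [heq] at step2
      exact le_trans step1 step2
    · exact core_dominate_nopiv p m u r hu hm hpm

theorem max?_eq_maxChar (s : List Char) (h : s ≠ []) :
    PySem.List.max? s (fun c => c) = some (maxChar s) := by
  match s with
  | c :: t => exact PySem.List.max?_id_cons c t

theorem foldl_opt_inv (F : Option (List Char) → List Char → Option (List Char))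
    (hFlt : ∀ (a x : List Char), a < x → F (some a) x = some x)
    (hFge : ∀ (a x : List Char), ¬ a < x → F (some a) x = some a) :
    ∀ (t : List (List Char)) (a mm : List Char),
      List.foldl F (some a) t = some mm → a ≤ mm ∧ ∀ y ∈ t, y ≤ mm := by
  intro t
  induction t with
  | nil =>
    intro a mm h0
    simp at h0
    subst h0
    exact ⟨le_refl _, by simp⟩
  | cons x t ih =>
    intro a mm h0
    rw [List.foldl_cons] at h0
    by_cases hax : a < x
    · rw [hFlt a x hax] at h0
      obtain ⟨h1, hall⟩ := ih x mm h0
      refine ⟨le_trans (le_of_lt hax) h1, ?_⟩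
      intro y hy
      rcases List.mem_cons.mp hy with rfl|hy
      · exact h1
      · exact hall y hy
    · rw [hFge a x hax] at h0
      obtain ⟨h1, hall⟩ := ih a mm h0
      refine ⟨h1, ?_⟩
      intro y hy
      rcases List.mem_cons.mp hy with rfl|hy
      · exact le_trans (not_lt.mp hax) h1
      · exact hall y hy

theorem max?_isMax' (xs : List (List Char)) (m : List Char)
    (h : PySem.List.max? xs (fun r => r) = some m) : ∀ y ∈ xs, y ≤ m := by
  match xs with
  | [] => simp [PySem.List.max?] at h
  | x :: t =>
    simp only [PySem.List.max?, List.foldl] at h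
    have hinv := foldl_opt_inv _ (by intro a x hax; simp [hax]) (by intro a x hax; simp [hax]) t x m h
    intro y hy
    rcases List.mem_cons.mp hy with rfl|hy
    · exact hinv.1
    · exact hinv.2 y hy

theorem fA_eq_core (s : List Char) : fA s = core s := by
  by_cases h2 : s.length < 2
  · rw [fA, core]; simp [h2]
  · have hlen : 2 ≤ s.length := Nat.not_lt.mp h2
    have hsne : s ≠ [] := by rintro rfl; simp at hlen
    rw [fA]
    rw [max?_eq_maxChar s hsne]
    simp only [if_neg h2]
    rw [PySem.List.foldl_append_if]
    set p := maxChar s with hp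
    set R := (((List.range s.length).attach.filter
        (fun i => s[i.1]? == some p)).map
        (fun i => p :: (fA (s.take i.1) ++ s.drop (i.1 + 1)))) with hR
    have hp_mem : p ∈ s := maxChar_mem s hsne
    obtain ⟨u, m, hs, hpm⟩ := exists_last_occ s p hp_mem
    have hple : ∀ c ∈ s, c ≤ p := le_maxChar s
    have hu : ∀ c ∈ u, c ≤ p := fun c hc => hple c (by rw [hs]; simp [hc])
    have hm : ∀ c ∈ m, c ≤ p := fun c hc => hple c (by rw [hs]; simp [hc])
    have hcore : core s = p :: core u ++ m := by rw [hs]; exact core_decomp u m p hu hm hpm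
    have hul : u.length < s.length := by rw [hs]; simp
    have hgetu : s[u.length]? = some p := by
      rw [hs, List.getElem?_append_right (le_refl u.length)]
      simp
    have htakeu : s.take u.length = u := by rw [hs]; exact List.take_left
    have hdropu : s.drop (u.length + 1) = m := by
      rw [hs]
      have h3 : u.length + 1 = (u ++ [p]).length := by simp
      have h4 : u ++ p :: m = (u ++ [p]) ++ m := by simp
      rw [h4, h3, List.drop_left]
    have hmemR : core s ∈ R := by
      rw [hR]
      apply List.mem_map.mpr
      refine ⟨⟨u.length, List.mem_range.mpr hul⟩, ?_, ?_⟩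
      · apply List.mem_filter.mpr
        exact ⟨List.mem_attach _ _, by simp [hgetu]⟩
      · rw [htakeu, hdropu, fA_eq_core u, hcore]
        simp
    have hub : ∀ y ∈ R, y ≤ core s := by
      intro y hy
      rw [hR] at hy
      obtain ⟨i, hif, rfl⟩ := List.mem_map.mp hy
      obtain ⟨i, hmem⟩ := i
      simp only at hif ⊢
      have hilen : i < s.length := List.mem_range.mp hmem
      have hgeti : s[i]? = some p := by
        have := (List.mem_filter.mp hif).2
        simpa using this
      have hgeti' : s[i]'hilen = p := by
        have := List.getElem?_eq_getElem hilen
        rw [this] at hgeti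
        exact Option.some.inj hgeti
      have hile : i ≤ u.length := by
        by_contra hgt
        rw [Nat.not_le] at hgt
        have : s[i]? = (p :: m)[i - u.length]? := by
          rw [hs, List.getElem?_append_right (le_of_lt hgt)]
        rw [hgeti] at this
        have h5 : (p :: m)[i - u.length]? = m[i - u.length - 1]? := by
          have : 0 < i - u.length := by omega
          rcases Nat.exists_eq_add_of_lt this with ⟨k, hk⟩
          have : i - u.length = k + 1 := by omega
          rw [this]
          simp
        rw [h5] at this
        have : p ∈ m := List.mem_of_getElem? this.symm
        exact hpm this
      rcases Nat.lt_or_ge i u.length with hlt | hge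
      · -- strictly before the last occurrence
        set u1 := u.take i with hu1
        set m1 := u.drop (i + 1) with hm1
        have hui : u = u1 ++ p :: m1 := by
          rw [hu1, hm1]
          have h6 : u.drop i = u[i]'hlt :: u.drop (i + 1) := List.drop_eq_getElem_cons hlt
          have h7 : u[i]'hlt = p := by
            have h8 : u[i]? = some p := by
              rw [hs, List.getElem?_append_left hlt] at hgeti
              exact hgeti
            rw [List.getElem?_eq_getElem hlt] at h8
            exact Option.some.inj h8
          rw [← h7]
          rw [← h6]
          exact (List.take_append_drop i u).symm
        have htakei : s.take i = u1 := by
          rw [hs, List.take_append_of_le_length (le_of_lt hlt)]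
        have hdropi : s.drop (i + 1) = m1 ++ p :: m := by
          rw [hs, List.drop_append_of_le_length (by omega), hm1]
        have hu1le : ∀ c ∈ u1, c ≤ p := fun c hc => hu c (List.mem_of_mem_take hc)
        have hm1le : ∀ c ∈ m1, c ≤ p := fun c hc => hu c (List.mem_of_mem_drop hc)
        rw [htakei, hdropi, fA_eq_core u1, hcore]
        have hdom := core_dominate p (m1.count p) m1 (le_refl _) u1 m hu1le hm1le
        rw [← hui] at hdom
        calc p :: (core u1 ++ (m1 ++ p :: m)) ≤ p :: (core u ++ m) := cons_le_cons_same p hdom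
          _ = p :: core u ++ m := by simp
      · have hieq : i = u.length := le_antisymm hile hge
        rw [hieq, htakeu, hdropu, fA_eq_core u, hcore]
        simp
    obtain ⟨x, hx⟩ : ∃ x, PySem.List.max? R (fun r => r) = some x := by
      rcases h : PySem.List.max? R (fun r => r) with _ | x
      · rw [PySem.List.max?_eq_none_iff] at h
        rw [h] at hmemR
        simp at hmemR
      · exact ⟨x, rfl⟩
    simp only [List.nil_append]
    rw [hx]
    have hxmem : x ∈ R := PySem.List.max?_mem hx
    have h1 : x ≤ core s := hub x hxmem
    have h2 : core s ≤ x := max?_isMax' R x hx (core s) hmemR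
    exact le_antisymm h1 h2
termination_by s.length
decreasing_by
  · simpa [htakeu] using hul
  · simp only [List.length_take]
    omega

theorem fBloop_eq_core (s picks : List Char) (tails : List (List Char)) :
    fBloop s picks tails = picks ++ core s ++ tails.reverse.flatten := by
  by_cases h2 : s.length < 2
  · rw [fBloop, core]
    simp [h2]
  · have hlen : 2 ≤ s.length := Nat.not_lt.mp h2
    have hsne : s ≠ [] := by rintro rfl; simp at hlen
    rw [fBloop]
    rw [max?_eq_maxChar s hsne]
    simp only [if_neg h2]
    set p := maxChar s with hp
    have hpmem : p ∈ s.reverse := by simpa using maxChar_mem s hsne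
    obtain ⟨k, hk⟩ := Option.isSome_iff_exists.mp ((PySem.List.index?_isSome_iff s.reverse p).mpr hpmem)
    rw [hk]
    have hkidx : k = s.reverse.idxOf p := by
      obtain ⟨pre, suf, hrev, hlenpre, hnp⟩ := (PySem.List.index?_eq_some_iff s.reverse p k).mp hk
      rw [hrev, List.idxOf_append]
      simp [hnp, List.idxOf_cons_self, hlenpre]
    have hjeq : s.length - 1 - k = jmaxIdx s := by
      unfold jmaxIdx
      rw [hkidx, hp]
    show fBloop (s.take (s.length - 1 - k)) (picks ++ [p]) (tails ++ [s.drop (s.length - 1 - k + 1)]) =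
      picks ++ core s ++ tails.reverse.flatten
    rw [fBloop_eq_core (s.take (s.length - 1 - k)) (picks ++ [p]) (tails ++ [s.drop (s.length - 1 - k + 1)])]
    rw [core_eq_cons s hlen, ← hp, hjeq]
    simp
termination_by s.length
decreasing_by
  simp only [List.length_take]
  omega

-- ===== VERDICT (by name: the statement is the Claim_ definition above) =====
theorem f_spec : Claim_equal_f := by
  intro line _
  unfold Spec_f f f_alt
  rw [fA_eq_core, fBloop_eq_core]
  simp
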